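-- pv_equiv track=rewrite | github.com/TravisWheelerLab/polyA | polyA/fill_confidence_matrix.py | trailing_edges_info
-- ===== SOURCE A (Python) =====
-- from typing import Dict, List, Tuple
--
-- def trailing_edges_info(row_num, col_num, align_matrix):
--
--     non_empty_cols_trailing_edges: List[int] = []
--     active_cells_trailing_edges: Dict[int, List[int]] = {}
--
--     for col in range(col_num):
--         active_count = 0
--         temp_list = []
--         for row in range(row_num):
--             if (row, col) in align_matrix:
--                 active_count = 1
--                 temp_list.append(row)
--         if active_count:
--             non_empty_cols_trailing_edges.append(col)
--             active_cells_trailing_edges[col] = temp_list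
--
--     return non_empty_cols_trailing_edges, active_cells_trailing_edges
-- ===== SOURCE B (Python) =====
-- def trailing_edges_info(row_num, col_num, align_matrix):
--     # Bucket the in-range keys by column, then sort; O(K log K) in the number
--     # of matrix entries instead of scanning every (row, col) grid cell.
--     buckets = {}
--     for row, col in align_matrix:
--         if 0 <= row < row_num and 0 <= col < col_num:
--             s = buckets.get(col, set())
--             s.add(row)
--             buckets[col] = s
--     cols = sorted(buckets)
--     return cols, {c: sorted(buckets[c]) for c in cols}
-- ===== Notes on version B (the rewrite author's own statement) =====
-- stated objective: faster
-- what changed: Instead of scanning every (row, col) grid cell and testing dict membership, B iterates once over the dict keys, buckets in-range rows by column, and sorts columns and each row bucket.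
import Mathlib
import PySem

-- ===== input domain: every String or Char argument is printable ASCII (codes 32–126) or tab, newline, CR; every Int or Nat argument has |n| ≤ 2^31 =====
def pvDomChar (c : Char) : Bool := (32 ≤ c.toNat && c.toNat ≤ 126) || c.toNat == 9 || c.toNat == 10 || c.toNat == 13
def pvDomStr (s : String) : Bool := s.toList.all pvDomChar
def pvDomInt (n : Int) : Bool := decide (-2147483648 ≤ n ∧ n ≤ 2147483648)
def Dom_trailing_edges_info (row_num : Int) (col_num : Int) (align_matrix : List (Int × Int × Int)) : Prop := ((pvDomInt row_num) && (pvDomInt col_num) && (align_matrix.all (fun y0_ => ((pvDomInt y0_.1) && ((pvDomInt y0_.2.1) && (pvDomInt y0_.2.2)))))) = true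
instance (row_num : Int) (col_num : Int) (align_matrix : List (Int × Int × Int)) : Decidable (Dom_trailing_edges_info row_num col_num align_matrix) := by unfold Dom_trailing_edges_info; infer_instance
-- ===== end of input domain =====

-- B replaces A's scan of the whole row_num × col_num grid by one bucketing pass
-- over the dict keys followed by sorting; the return values agree on all inputs.

-- ===== PORT A =====
-- literal port of A: for each col in range(col_num), scan each row in range(row_num),
-- test dict-key membership ('(row, col) in align_matrix'), collect the hit rows;
-- the result dict is a PySem.Dict returned as its items list
def trailing_edges_info (row_num : Int) (col_num : Int) (align_matrix : List (Int × Int × Int)) : List Int × (List (Int × List Int)) :=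
  let result := (PySem.List.pyRange 0 col_num 1).foldl
    (fun (acc : List Int × PySem.Dict Int (List Int)) col =>
      let inner := (PySem.List.pyRange 0 row_num 1).foldl
        (fun (st : Int × List Int) row =>
          if align_matrix.any (fun e => e.1 == row && e.2.1 == col) then
            (1, st.2 ++ [row])
          else st) ((0 : Int), ([] : List Int))
      if inner.1 ≠ 0 then (acc.1 ++ [col], acc.2.insert col inner.2) else acc)
    (([] : List Int), (PySem.Dict.empty : PySem.Dict Int (List Int)))
  (result.1, result.2.items)

-- ===== PORT B =====
-- literal port of Source B: one pass over the keys bucketing in-range rows by column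
-- (s = buckets.get(col, set()); s.add(row); buckets[col] = s), then sort the
-- columns and each bucket
def trailing_edges_info_alt (row_num : Int) (col_num : Int) (align_matrix : List (Int × Int × Int)) : List Int × (List (Int × List Int)) :=
  let buckets := align_matrix.foldl
    (fun (d : PySem.Dict Int (PySem.Set Int)) e =>
      if 0 ≤ e.1 ∧ e.1 < row_num ∧ 0 ≤ e.2.1 ∧ e.2.1 < col_num then
        d.insert e.2.1 (PySem.Set.add (d.getD e.2.1 PySem.Set.empty) e.1)
      else d) (PySem.Dict.empty : PySem.Dict Int (PySem.Set Int))
  let cols := PySem.List.sorted buckets.keys (fun x => x) false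
  (cols, cols.map (fun c => (c, PySem.List.sorted (buckets.getD c PySem.Set.empty) (fun x => x) false)))

-- ===== PRECONDITION & SPEC =====
def Spec_trailing_edges_info (row_num : Int) (col_num : Int) (align_matrix : List (Int × Int × Int)) (out : List Int × (List (Int × List Int))) : Prop := out = trailing_edges_info_alt row_num col_num align_matrix
instance (row_num : Int) (col_num : Int) (align_matrix : List (Int × Int × Int)) (out : List Int × (List (Int × List Int))) : Decidable (Spec_trailing_edges_info row_num col_num align_matrix out) := by unfold Spec_trailing_edges_info; infer_instance

-- ===== CLAIM (what is proved, stated in full; the proofs are below) =====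
def Claim_equal_trailing_edges_info : Prop := ∀ (row_num : Int) (col_num : Int) (align_matrix : List (Int × Int × Int)), Dom_trailing_edges_info row_num col_num align_matrix → Spec_trailing_edges_info row_num col_num align_matrix (trailing_edges_info row_num col_num align_matrix)

-- ===== LEMMAS AND PROOFS =====
def pvHit (m : List (Int × Int × Int)) (r c : Int) : Bool := m.any (fun e => e.1 == r && e.2.1 == c)
def pvRows (rn : Int) (m : List (Int × Int × Int)) (c : Int) : List Int :=
  (PySem.List.pyRange 0 rn 1).filter (fun r => pvHit m r c)
def pvHitCol (rn : Int) (m : List (Int × Int × Int)) (c : Int) : Bool :=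
  (PySem.List.pyRange 0 rn 1).any (fun r => pvHit m r c)
def pvStepA (rn : Int) (m : List (Int × Int × Int))
    (acc : List Int × PySem.Dict Int (List Int)) (col : Int) : List Int × PySem.Dict Int (List Int) :=
  let inner := (PySem.List.pyRange 0 rn 1).foldl
    (fun (st : Int × List Int) row =>
      if m.any (fun e => e.1 == row && e.2.1 == col) then (1, st.2 ++ [row]) else st)
    ((0 : Int), ([] : List Int))
  if inner.1 ≠ 0 then (acc.1 ++ [col], acc.2.insert col inner.2) else acc

lemma pvInner (m : List (Int × Int × Int)) (c : Int) (l : List Int) :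
    ∀ (a : Int) (t : List Int),
      l.foldl (fun (st : Int × List Int) row =>
          if m.any (fun e => e.1 == row && e.2.1 == c) then (1, st.2 ++ [row]) else st) (a, t)
      = (if l.any (fun r => pvHit m r c) then 1 else a, t ++ l.filter (fun r => pvHit m r c)) := by
  induction l with
  | nil => intro a t; simp
  | cons x xs ih =>
    intro a t
    cases h : (m.any fun e => e.1 == x && e.2.1 == c) with
    | true => simp [List.foldl_cons, h, ih, pvHit]
    | false =>
      simp only [List.foldl_cons, h, ih, pvHit, List.any_cons, List.filter_cons,
        Bool.false_or, Bool.false_eq_true, if_false]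
      simp

lemma pvStepA_eq (rn : Int) (m : List (Int × Int × Int)) (acc : List Int × PySem.Dict Int (List Int)) (c : Int) :
    pvStepA rn m acc c
      = if pvHitCol rn m c then (acc.1 ++ [c], acc.2.insert c (pvRows rn m c)) else acc := by
  unfold pvStepA
  rw [pvInner m c]
  cases h : pvHitCol rn m c with
  | true => simp only [pvHitCol] at h; simp [h, pvRows]
  | false => simp only [pvHitCol] at h; simp [h]

lemma pvOuter (rn : Int) (m : List (Int × Int × Int)) (l : List Int) :
    ∀ (acc1 : List Int) (d : PySem.Dict Int (List Int)),
      l.Nodup → (∀ c ∈ l, d.contains c = false) →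
      l.foldl (pvStepA rn m) (acc1, d)
      = (acc1 ++ l.filter (pvHitCol rn m),
         PySem.Dict.mk (d.items ++ (l.filter (pvHitCol rn m)).map (fun c => (c, pvRows rn m c)))) := by
  induction l with
  | nil => intro acc1 d _ _; simp
  | cons c cs ih =>
    intro acc1 d hnd hcon
    simp only [List.nodup_cons] at hnd
    rw [List.foldl_cons, pvStepA_eq]
    cases hcond : pvHitCol rn m c with
    | false =>
      rw [if_neg (by simp)]
      rw [ih acc1 d hnd.2 (fun c' hc' => hcon c' (List.mem_cons_of_mem _ hc'))]
      simp [hcond]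
    | true =>
      have hfresh : d.contains c = false := hcon c List.mem_cons_self
      rw [if_pos (by simp)]
      rw [ih (acc1 ++ [c]) (d.insert c (pvRows rn m c)) hnd.2
        (fun c' hc' => by
          rw [PySem.Dict.contains_insert]
          have hne : c' ≠ c := fun h => hnd.1 (h ▸ hc')
          simp [hne, hcon c' (List.mem_cons_of_mem _ hc')])]
      simp [hcond, PySem.Dict.items_insert_of_not_contains _ _ hfresh]

def pvStepB (d : PySem.Dict Int (PySem.Set Int)) (e : Int × Int × Int) : PySem.Dict Int (PySem.Set Int) :=
  d.insert e.2.1 (PySem.Set.add (d.getD e.2.1 PySem.Set.empty) e.1)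

def pvKeep (rn cn : Int) (m : List (Int × Int × Int)) : List (Int × Int × Int) :=
  m.filter (fun e => decide (0 ≤ e.1 ∧ e.1 < rn ∧ 0 ≤ e.2.1 ∧ e.2.1 < cn))

-- the bucket dict B builds
def pvBuckets (rn cn : Int) (m : List (Int × Int × Int)) : PySem.Dict Int (PySem.Set Int) :=
  (pvKeep rn cn m).foldl pvStepB PySem.Dict.empty

lemma pvBuckets_eq (rn cn : Int) (m : List (Int × Int × Int)) :
    m.foldl (fun (d : PySem.Dict Int (PySem.Set Int)) e =>
      if 0 ≤ e.1 ∧ e.1 < rn ∧ 0 ≤ e.2.1 ∧ e.2.1 < cn then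
        d.insert e.2.1 (PySem.Set.add (d.getD e.2.1 PySem.Set.empty) e.1)
      else d) PySem.Dict.empty = pvBuckets rn cn m :=
  PySem.List.foldl_ite_eq_foldl_filter _ _ m _

lemma pvBuckets_keys (rn cn : Int) (m : List (Int × Int × Int)) :
    (pvBuckets rn cn m).keys = PySem.Set.ofList ((pvKeep rn cn m).map (·.2.1)) := by
  unfold pvBuckets pvStepB
  rw [PySem.Dict.keys_foldl_insert_key (pvKeep rn cn m) (·.2.1)
    (fun d e => PySem.Set.add (d.getD e.2.1 PySem.Set.empty) e.1) PySem.Dict.empty]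
  simp [PySem.Dict.keys_empty, PySem.Set.update, PySem.Set.ofList]

lemma pvGetD (l : List (Int × Int × Int)) :
    ∀ (d : PySem.Dict Int (PySem.Set Int)) (c : Int),
      (l.foldl pvStepB d).getD c PySem.Set.empty
      = PySem.Set.update (d.getD c PySem.Set.empty) ((l.filter (fun e => e.2.1 == c)).map (·.1)) := by
  induction l with
  | nil => intro d c; simp [PySem.Set.update]
  | cons e es ih =>
    intro d c
    rw [List.foldl_cons, ih]
    by_cases h : e.2.1 = c
    · simp [pvStepB, h, PySem.Set.update]
    · have : (e.2.1 == c) = false := by simp [h]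
      simp [pvStepB, this, PySem.Dict.getD_insert, Ne.symm h]
def pvCols (rn cn : Int) (m : List (Int × Int × Int)) : List Int :=
  (PySem.List.pyRange 0 cn 1).filter (pvHitCol rn m)

lemma pvA_char (rn cn : Int) (m : List (Int × Int × Int)) :
    trailing_edges_info rn cn m = (pvCols rn cn m, (pvCols rn cn m).map (fun c => (c, pvRows rn m c))) := by
  have h := pvOuter rn m (PySem.List.pyRange 0 cn 1) [] PySem.Dict.empty
    (PySem.List.nodup_pyRange_one 0 cn) (fun c _ => PySem.Dict.contains_empty c)
  have hA : trailing_edges_info rn cn m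
      = (((PySem.List.pyRange 0 cn 1).foldl (pvStepA rn m)
            (([] : List Int), (PySem.Dict.empty : PySem.Dict Int (List Int)))).1,
         ((PySem.List.pyRange 0 cn 1).foldl (pvStepA rn m)
            (([] : List Int), (PySem.Dict.empty : PySem.Dict Int (List Int)))).2.items) := rfl
  rw [hA, h]
  simp [pvCols]
  rfl

lemma pvHit_iff (m : List (Int × Int × Int)) (r c : Int) :
    pvHit m r c = true ↔ ∃ e ∈ m, e.1 = r ∧ e.2.1 = c := by
  simp [pvHit]

lemma mem_pvCols (rn cn : Int) (m : List (Int × Int × Int)) (c : Int) :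
    c ∈ pvCols rn cn m ↔ ∃ e ∈ m, (0 ≤ e.1 ∧ e.1 < rn ∧ 0 ≤ c ∧ c < cn) ∧ e.2.1 = c := by
  simp only [pvCols, List.mem_filter, PySem.List.mem_pyRange_one, pvHitCol, List.any_eq_true,
    pvHit_iff]
  constructor
  · rintro ⟨⟨hc0, hc1⟩, r, hr, e, hem, he1, he2⟩
    exact ⟨e, hem, ⟨he1 ▸ hr.1, he1 ▸ hr.2, hc0, hc1⟩, he2⟩
  · rintro ⟨e, hem, ⟨h1, h2, h3, h4⟩, he2⟩
    exact ⟨⟨h3, h4⟩, e.1, ⟨h1, h2⟩, e, hem, rfl, he2⟩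

lemma mem_keepCols (rn cn : Int) (m : List (Int × Int × Int)) (c : Int) :
    c ∈ PySem.Set.ofList ((pvKeep rn cn m).map (·.2.1)) ↔
      ∃ e ∈ m, (0 ≤ e.1 ∧ e.1 < rn ∧ 0 ≤ c ∧ c < cn) ∧ e.2.1 = c := by
  simp only [PySem.Set.mem_ofList, List.mem_map, pvKeep, List.mem_filter, decide_eq_true_eq]
  constructor
  · rintro ⟨e, ⟨hem, h1, h2, h3, h4⟩, he⟩
    exact ⟨e, hem, ⟨h1, h2, he ▸ h3, he ▸ h4⟩, he⟩
  · rintro ⟨e, hem, ⟨h1, h2, h3, h4⟩, he⟩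
    exact ⟨e, ⟨hem, h1, h2, he ▸ h3, he ▸ h4⟩, he⟩

lemma pvRows_nodup (rn : Int) (m : List (Int × Int × Int)) (c : Int) : (pvRows rn m c).Nodup :=
  (PySem.List.nodup_pyRange_one 0 rn).filter _

lemma pvRows_pairwise (rn : Int) (m : List (Int × Int × Int)) (c : Int) :
    (pvRows rn m c).Pairwise (· < ·) :=
  (PySem.List.pairwise_lt_pyRange_one 0 rn).filter _

lemma pvCols_nodup (rn cn : Int) (m : List (Int × Int × Int)) : (pvCols rn cn m).Nodup :=
  (PySem.List.nodup_pyRange_one 0 cn).filter _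

lemma pvCols_eq (rn cn : Int) (m : List (Int × Int × Int)) :
    PySem.List.sorted (pvBuckets rn cn m).keys (fun x => x) false = pvCols rn cn m := by
  rw [pvBuckets_keys]
  apply PySem.List.sorted_eq_of_perm_of_pairwise_lt
  · rw [List.perm_ext_iff_of_nodup (pvCols_nodup rn cn m) (PySem.Set.nodup_ofList _)]
    intro c
    rw [mem_pvCols, mem_keepCols]
  · exact ((PySem.List.pairwise_lt_pyRange_one 0 cn).filter _)

lemma pvRows_eq (rn cn : Int) (m : List (Int × Int × Int)) (c : Int)
    (hc : 0 ≤ c ∧ c < cn) :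
    PySem.List.sorted ((pvBuckets rn cn m).getD c PySem.Set.empty) (fun x => x) false = pvRows rn m c := by
  have hg := pvGetD (pvKeep rn cn m) PySem.Dict.empty c
  rw [pvBuckets, hg, PySem.Dict.getD_empty]
  have : PySem.Set.update (PySem.Set.empty : PySem.Set Int)
      (((pvKeep rn cn m).filter (fun e => e.2.1 == c)).map (·.1))
      = PySem.Set.ofList (((pvKeep rn cn m).filter (fun e => e.2.1 == c)).map (·.1)) := rfl
  rw [this]
  apply PySem.List.sorted_eq_of_perm_of_pairwise_lt
  · rw [List.perm_ext_iff_of_nodup (pvRows_nodup rn m c) (PySem.Set.nodup_ofList _)]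
    intro r
    simp only [pvRows, List.mem_filter, PySem.List.mem_pyRange_one, pvHit_iff,
      PySem.Set.mem_ofList, List.mem_map, pvKeep, decide_eq_true_eq, beq_iff_eq]
    constructor
    · rintro ⟨⟨hr0, hr1⟩, e, hem, he1, he2⟩
      exact ⟨e, ⟨⟨hem, he1 ▸ hr0, he1 ▸ hr1, he2 ▸ hc.1, he2 ▸ hc.2⟩, he2⟩, he1⟩
    · rintro ⟨e, ⟨⟨hem, h1, h2, _, _⟩, he2⟩, he1⟩
      exact ⟨⟨he1 ▸ h1, he1 ▸ h2⟩, e, hem, he1, he2⟩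
  · exact pvRows_pairwise rn m c

theorem pvMain (rn cn : Int) (m : List (Int × Int × Int)) :
    trailing_edges_info rn cn m = trailing_edges_info_alt rn cn m := by
  rw [pvA_char]
  simp only [trailing_edges_info_alt, pvBuckets_eq, pvCols_eq]
  refine Prod.ext rfl ?_
  simp only
  apply List.map_congr_left
  intro c hc
  have hcb : 0 ≤ c ∧ c < cn := by
    have := (mem_pvCols rn cn m c).mp hc
    obtain ⟨e, _, ⟨_, _, h3, h4⟩, _⟩ := this
    exact ⟨h3, h4⟩
  rw [pvRows_eq rn cn m c hcb]

-- ===== VERDICT (by name: the statement is the Claim_ definition above) =====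
theorem trailing_edges_info_spec : Claim_equal_trailing_edges_info := by
  intro row_num col_num align_matrix _
  unfold Spec_trailing_edges_info
  exact pvMain row_num col_num align_matrix
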